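-- pv_equiv track=rewrite | github.com/Simioniuc-Ionut/GUI_HTTP_Sniffer-Python | main.py | find_http_method
-- ===== SOURCE A (Python) =====
-- def find_http_method(decoded_data):
--     start_index = -1
--     for i in range(len(decoded_data)):
--         if decoded_data[i:i+3] in ('GET', 'POS', 'HEA', 'PUT', 'DEL', 'OPT', 'PAT'):
--             start_index = i
--             break
--     if start_index == -1:
--         raise ValueError("Failed to find a valid HTTP request line")
--
--     # Extract the valid HTTP data starting from the Request Line
--     valid_http_data = decoded_data[start_index:]
--     return valid_http_data
-- ===== SOURCE B (Python) =====
-- def find_http_method(decoded_data):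
--     hits = [j for j in (decoded_data.find(p) for p in
--                         ('GET', 'POS', 'HEA', 'PUT', 'DEL', 'OPT', 'PAT'))
--             if j >= 0]
--     if not hits:
--         raise ValueError("Failed to find a valid HTTP request line")
--     return decoded_data[min(hits):]
-- ===== Notes on version B (the rewrite author's own statement) =====
-- stated objective: idiomatic
-- what changed: A scans every index comparing the 3-char slice against the tuple of method prefixes and breaks at the first hit; B runs one whole-string .find per prefix, keeps the non-negative results and slices at their minimum.
import Mathlib
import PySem

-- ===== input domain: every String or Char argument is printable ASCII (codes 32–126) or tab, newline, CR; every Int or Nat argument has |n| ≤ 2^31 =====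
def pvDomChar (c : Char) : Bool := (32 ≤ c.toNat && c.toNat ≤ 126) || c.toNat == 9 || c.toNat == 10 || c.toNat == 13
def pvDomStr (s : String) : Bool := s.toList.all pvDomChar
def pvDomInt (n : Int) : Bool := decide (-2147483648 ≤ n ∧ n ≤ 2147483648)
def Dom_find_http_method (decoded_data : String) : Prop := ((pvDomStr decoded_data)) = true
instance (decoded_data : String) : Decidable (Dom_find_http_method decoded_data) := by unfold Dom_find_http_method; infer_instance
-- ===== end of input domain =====

-- B replaces A's per-index scan (slice i:i+3 against seven prefixes, first hit wins) by seven
-- whole-string .find searches whose non-negative results are aggregated with min (objective: idiomatic).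

-- the tuple ('GET','POS','HEA','PUT','DEL','OPT','PAT'), shared literal of both programs
def pvPrefixes : List (List Char) := ["GET".toList, "POS".toList, "HEA".toList, "PUT".toList,
  "DEL".toList, "OPT".toList, "PAT".toList]

-- ===== PORT A =====
-- the 'for i in range(len(decoded_data)): if decoded_data[i:i+3] in (...): break' loop;
-- returns the Python start_index (first matching i, or -1)
def find_http_method_loop (cs : List Char) (i : Nat) : Int :=
  if _h : i < cs.length then
    if PySem.Chars.slice cs (some (i : Int)) (some ((i : Int) + 3)) ∈ pvPrefixes then (i : Int)
    else find_http_method_loop cs (i + 1)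
  else (-1)
termination_by cs.length - i

def find_http_method (decoded_data : String) : String :=
  let cs := decoded_data.toList
  let start_index := find_http_method_loop cs 0
  if start_index = -1 then ""   -- Python raises ValueError here; excluded by Pre_
  else String.ofList (PySem.Chars.slice cs (some start_index) none)

-- ===== PORT B =====
def find_http_method_alt (decoded_data : String) : String :=
  let cs := decoded_data.toList
  let hits := (pvPrefixes.map (fun p => PySem.Chars.find cs p)).filter (fun j => decide (0 ≤ j))
  match PySem.List.min? hits id with
  | none => ""                  -- Python raises ValueError here; excluded by Pre_
  | some m => String.ofList (PySem.Chars.slice cs (some m) none)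

-- ===== PRECONDITION & SPEC =====
-- Pre_ excludes exactly the inputs containing none of the seven method prefixes, on which A raises ValueError.
def Pre_find_http_method (decoded_data : String) : Prop :=
  (pvPrefixes.any (fun p => PySem.Chars.isIn p decoded_data.toList)) = true
instance (decoded_data : String) : Decidable (Pre_find_http_method decoded_data) := by
  unfold Pre_find_http_method; infer_instance

def pvWitness_find_http_method : String := "GET / HTTP/1.1\r\nHost: x\r\n\r\n"

def Spec_find_http_method (decoded_data : String) (out : String) : Prop := out = find_http_method_alt decoded_data
instance (decoded_data : String) (out : String) : Decidable (Spec_find_http_method decoded_data out) := by unfold Spec_find_http_method; infer_instance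

-- ===== CLAIM (what is proved, stated in full; the proofs are below) =====
def Claim_equal_find_http_method : Prop := ∀ (decoded_data : String), Dom_find_http_method decoded_data → Pre_find_http_method decoded_data → Spec_find_http_method decoded_data (find_http_method decoded_data)

-- ===== LEMMAS AND PROOFS =====

-- "some prefix matches at position i"
def pvMatch (cs : List Char) (i : Nat) : Prop := ∃ p ∈ pvPrefixes, p <+: cs.drop i

lemma pvPrefixes_len {p : List Char} (hp : p ∈ pvPrefixes) : p.length = 3 := by
  fin_cases hp <;> decide

lemma slice_mem_iff_match (cs : List Char) (i : Nat) :
    (PySem.Chars.slice cs (some (i : Int)) (some ((i : Int) + 3)) ∈ pvPrefixes) ↔ pvMatch cs i := by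
  have hs : PySem.Chars.slice cs (some (i : Int)) (some ((i : Int) + 3))
      = List.take 3 (List.drop i cs) := by
    have := PySem.List.slice_toNat (a := (i : Int)) (b := (i : Int) + 3) cs
      (by positivity) (by positivity)
    simpa [PySem.Chars.slice, Int.toNat_natCast, show ((i : Int) + 3).toNat - i = 3 by omega]
      using this
  rw [hs]
  constructor
  · intro h
    exact ⟨_, h, by
      have := pvPrefixes_len h
      exact ⟨List.drop 3 (List.drop i cs), by simp⟩⟩
  · rintro ⟨p, hp, hpre⟩
    have h3 := pvPrefixes_len hp
    have : List.take 3 (List.drop i cs) = p := by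
      have := List.prefix_iff_eq_take.mp hpre
      rw [h3] at this; exact this.symm
    rwa [this]

lemma match_lt_length {cs : List Char} {j : Nat} (h : pvMatch cs j) : j < cs.length := by
  rcases h with ⟨p, hp, hpre⟩
  by_contra hge
  have : cs.drop j = [] := List.drop_eq_nil_of_le (by omega)
  rw [this] at hpre
  have := List.eq_nil_of_prefix_nil hpre
  have h3 := pvPrefixes_len hp
  simp [this] at h3

-- the loop returns -1 (no match from i on) or the least matching index ≥ i
lemma loop_spec (cs : List Char) (i : Nat) :
    (find_http_method_loop cs i = -1 ∧ ∀ j, i ≤ j → ¬ pvMatch cs j) ∨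
    (∃ k : Nat, find_http_method_loop cs i = (k : Int) ∧ i ≤ k ∧ pvMatch cs k ∧
      ∀ j, i ≤ j → j < k → ¬ pvMatch cs j) := by
  by_cases h : i < cs.length
  · rw [find_http_method_loop]
    rw [dif_pos h]
    by_cases hm : PySem.Chars.slice cs (some (i : Int)) (some ((i : Int) + 3)) ∈ pvPrefixes
    · right
      exact ⟨i, by rw [if_pos hm], le_refl i,
        (slice_mem_iff_match cs i).mp hm, fun j h1 h2 _ => by omega⟩
    · rw [if_neg hm]
      have hnm : ¬ pvMatch cs i := fun hc => hm ((slice_mem_iff_match cs i).mpr hc)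
      rcases loop_spec cs (i + 1) with ⟨he, hall⟩ | ⟨k, he, hik, hk, hleast⟩
      · left
        refine ⟨he, fun j hj hc => ?_⟩
        rcases Nat.eq_or_lt_of_le hj with rfl | hlt
        · exact hnm hc
        · exact hall j hlt hc
      · right
        refine ⟨k, he, by omega, hk, fun j hj hjk hc => ?_⟩
        rcases Nat.eq_or_lt_of_le hj with rfl | hlt
        · exact hnm hc
        · exact hleast j hlt hjk hc
  · rw [find_http_method_loop]
    rw [dif_neg h]
    left
    exact ⟨rfl, fun j hj hc => absurd (match_lt_length hc) (by omega)⟩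
termination_by cs.length - i

-- every element of B's hits list is a matching index, and every matching index is ≥ some hit
lemma hits_mem_iff (cs : List Char) (m : Int) :
    m ∈ (pvPrefixes.map (fun p => PySem.Chars.find cs p)).filter (fun j => decide (0 ≤ j)) ↔
    (∃ p ∈ pvPrefixes, PySem.Chars.find cs p = m) ∧ 0 ≤ m := by
  simp [List.mem_filter, List.mem_map, and_comm]

theorem find_http_method_spec : Claim_equal_find_http_method := by
  intro s _hdom hpre
  unfold Spec_find_http_method find_http_method find_http_method_alt
  set cs := s.toList with hcs
  -- Pre_ gives a prefix occurring in cs, hence a matching index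
  rw [Pre_find_http_method, List.any_eq_true] at hpre
  obtain ⟨p0, hp0, hin⟩ := hpre
  have hfind0 : 0 ≤ PySem.Chars.find cs p0 := by
    rw [PySem.Chars.find_nonneg_iff]
    exact (PySem.Chars.isIn_iff_infix p0 cs).mp hin
  have hmatch0 : pvMatch cs (PySem.Chars.find cs p0).toNat :=
    ⟨p0, hp0, (PySem.Chars.find_spec hfind0).1⟩
  -- A side: the loop returns the least matching index k
  rcases loop_spec cs 0 with ⟨_, hall⟩ | ⟨k, hloop, _, hk, hleast⟩
  · exact absurd hmatch0 (hall _ (Nat.zero_le _))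
  -- B side: hits is nonempty, min? returns some m
  set hits := (pvPrefixes.map (fun p => PySem.Chars.find cs p)).filter (fun j => decide (0 ≤ j))
    with hhits
  have hmem0 : PySem.Chars.find cs p0 ∈ hits := by
    rw [hhits, hits_mem_iff]; exact ⟨⟨p0, hp0, rfl⟩, hfind0⟩
  obtain ⟨m, hmin⟩ : ∃ m, PySem.List.min? hits id = some m := by
    cases hopt : PySem.List.min? hits id with
    | none =>
        have := (PySem.List.min?_eq_none_iff hits id).mp hopt
        rw [this] at hmem0; exact absurd hmem0 (List.not_mem_nil)
    | some m => exact ⟨m, rfl⟩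
  -- m is a matching index
  have hmhits := PySem.List.min?_mem hmin
  obtain ⟨⟨q, hq, hfq⟩, hm0⟩ := (hits_mem_iff cs m).mp (hhits ▸ hmhits)
  have hfq0 : 0 ≤ PySem.Chars.find cs q := by rw [hfq]; exact hm0
  have hmatchm : pvMatch cs m.toNat := ⟨q, hq, by
    have := (PySem.Chars.find_spec hfq0).1; rwa [hfq] at this⟩
  -- m is ≤ every matching index
  have hmle : ∀ j : Nat, pvMatch cs j → m.toNat ≤ j := by
    rintro j ⟨p, hp, hpre⟩
    have hfp : 0 ≤ PySem.Chars.find cs p := by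
      rw [PySem.Chars.find_nonneg_iff]
      obtain ⟨t, ht⟩ := hpre
      exact ⟨List.take j cs, t, by rw [List.append_assoc, ht, List.take_append_drop]⟩
    have hple : (PySem.Chars.find cs p).toNat ≤ j := by
      by_contra hgt
      exact (PySem.Chars.find_spec hfp).2 j (by omega) hpre
    have : m ≤ PySem.Chars.find cs p := by
      have : PySem.Chars.find cs p ∈ hits := by
        rw [hhits, hits_mem_iff]; exact ⟨⟨p, hp, rfl⟩, hfp⟩
      simpa using PySem.List.min?_isMin hmin _ this
    omega
  -- hence k = m
  have hkm : (k : Int) = m := by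
    have h1 : m.toNat ≤ k := hmle k hk
    have h2 : k ≤ m.toNat := by
      by_contra hgt
      exact hleast m.toNat (Nat.zero_le _) (by omega) hmatchm
    omega
  simp only [hloop, hkm]
  rw [if_neg (by omega : ¬ m = -1), ← hhits, hmin]
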